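-- pv_equiv track=rewrite | github.com/ZeroProphet/klefki | zkp_playground/algorithms.py | bytes_mul
-- ===== SOURCE A (Python) =====
-- def bytes_mul(a, b, s=32):
--     t = [0] * 2 * s
--     a = a.to_bytes(s, "big")[::-1]
--     b = b.to_bytes(s, "big")[::-1]
--
--     for i in range(0, s):
--         C = 0
--         for j in range(0, s):
--             (C, S) = (t[i+j] + a[j] * b[i] + C).to_bytes(2, "big")
--             t[i+j] = S
--         t[i+s] = C
--     return t[::-1]
-- ===== SOURCE B (Python) =====
-- def bytes_mul(a, b, s=32):
--     # Since a, b < 256**s, the product fits in 2*s big-endian bytes.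
--     return list((a * b).to_bytes(2 * s, "big"))
-- ===== Notes on version B (the rewrite author's own statement) =====
-- stated objective: faster
-- what changed: Replaces the O(s^2) Python-level schoolbook limb loop (per-cell 2-byte to_bytes carry splits) by a single native bigint multiplication serialized once with (a*b).to_bytes(2*s,'big'); correct because 0 <= a,b < 256**s implies a*b < 256**(2*s).
import Mathlib
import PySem

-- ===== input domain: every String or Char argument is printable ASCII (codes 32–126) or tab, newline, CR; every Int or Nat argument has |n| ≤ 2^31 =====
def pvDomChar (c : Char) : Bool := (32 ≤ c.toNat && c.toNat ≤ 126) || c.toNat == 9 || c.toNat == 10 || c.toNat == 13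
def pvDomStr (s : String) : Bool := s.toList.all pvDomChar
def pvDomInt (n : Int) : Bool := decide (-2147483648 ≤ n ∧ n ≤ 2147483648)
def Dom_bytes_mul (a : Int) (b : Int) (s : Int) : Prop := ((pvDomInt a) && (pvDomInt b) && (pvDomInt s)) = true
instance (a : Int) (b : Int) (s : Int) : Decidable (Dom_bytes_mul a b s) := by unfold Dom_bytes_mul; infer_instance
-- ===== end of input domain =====

-- B replaces A's O(s^2) schoolbook limb loop by a single product serialized once as
-- (a*b).to_bytes(2*s,'big'); correct because 0 ≤ a,b < 256^s gives a*b < 256^(2s).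

-- ===== PORT A =====
-- shared hand port of int.to_bytes(n,'big'): exact big-endian byte list of n for 0 ≤ n < 256^len
-- (Python raises outside that range; Pre_ excludes those inputs).
def pyToBytesBE (n : Int) : Nat → List Int
  | 0 => []
  | m + 1 => pyToBytesBE (n / 256) m ++ [n % 256]

-- one inner step of A: (C, S) = (t[i+j] + a[j]*b[i] + C).to_bytes(2,'big'); t[i+j] = S.
-- The 2-byte unpack is exactly C = v / 256, S = v % 256 for 0 ≤ v < 65536, which holds on Pre_;
-- all list indices i+j are in range, so getD's default is never used.
def pvAstep (al bl : List Int) (i : Nat) (p : List Int × Int) (j : Nat) : List Int × Int :=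
  let v := p.1.getD (i + j) 0 + al.getD j 0 * bl.getD i 0 + p.2
  (p.1.set (i + j) (v % 256), v / 256)

-- one outer iteration of A: C = 0; the j-loop; then t[i+s] = C
def pvArow (al bl : List Int) (sn : Nat) (t : List Int) (i : Nat) : List Int :=
  let p := (List.range sn).foldl (pvAstep al bl i) (t, 0)
  p.1.set (i + sn) p.2

def bytes_mul (a : Int) (b : Int) (s : Int) : List Int :=
  let sn := s.toNat
  let al := (pyToBytesBE a sn).reverse   -- a.to_bytes(s,'big')[::-1]
  let bl := (pyToBytesBE b sn).reverse   -- b.to_bytes(s,'big')[::-1]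
  ((List.range sn).foldl (pvArow al bl sn) (List.replicate (2 * sn) (0 : Int))).reverse

-- ===== PORT B =====
-- list((a * b).to_bytes(2 * s, 'big'))
def bytes_mul_alt (a : Int) (b : Int) (s : Int) : List Int :=
  pyToBytesBE (a * b) (2 * s.toNat)

-- ===== PRECONDITION & SPEC =====
-- Exactly the inputs where A returns (both to_bytes calls succeed): 0 ≤ s, 0 ≤ a < 256^s, 0 ≤ b < 256^s.
-- Under Dom (|a|,|b| ≤ 2^31 < 256^4) the magnitude bound is automatic once 4 ≤ s, so it is only
-- computed for s ≤ 3; under Dom this disjunction is equivalent to a < 256^s ∧ b < 256^s.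
def Pre_bytes_mul (a : Int) (b : Int) (s : Int) : Prop :=
  (decide (0 ≤ s) && decide (0 ≤ a) && decide (0 ≤ b) &&
    (decide (4 ≤ s) || (decide (a.toNat < 256 ^ s.toNat) && decide (b.toNat < 256 ^ s.toNat)))) = true
instance (a : Int) (b : Int) (s : Int) : Decidable (Pre_bytes_mul a b s) := by
  unfold Pre_bytes_mul; infer_instance

def pvWitness_bytes_mul : Int × Int × Int := (12345, 67890, 4)

def Spec_bytes_mul (a : Int) (b : Int) (s : Int) (out : List Int) : Prop := out = bytes_mul_alt a b s
instance (a : Int) (b : Int) (s : Int) (out : List Int) : Decidable (Spec_bytes_mul a b s out) := by unfold Spec_bytes_mul; infer_instance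

-- ===== CLAIM (what is proved, stated in full; the proofs are below) =====
def Claim_equal_bytes_mul : Prop := ∀ (a : Int) (b : Int) (s : Int), Dom_bytes_mul a b s → Pre_bytes_mul a b s → Spec_bytes_mul a b s (bytes_mul a b s)

-- ===== LEMMAS AND PROOFS =====

-- little-endian value of a digit list, base 256
def pvVal (t : List Int) : Int := t.foldr (fun d acc => d + 256 * acc) 0

def pvBytes (t : List Int) : Prop := ∀ k : Nat, 0 ≤ t.getD k 0 ∧ t.getD k 0 < 256

-- little-endian byte expansion (= (pyToBytesBE n m).reverse)
def pvLE (n : Int) : Nat → List Int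
  | 0 => []
  | m + 1 => n % 256 :: pvLE (n / 256) m

theorem pvLE_rev (m : Nat) : ∀ n : Int, (pyToBytesBE n m).reverse = pvLE n m := by
  induction m with
  | zero => intro n; rfl
  | succ m ih => intro n; simp [pyToBytesBE, pvLE, ih]

theorem pvLE_length (m : Nat) : ∀ n : Int, (pvLE n m).length = m := by
  induction m with
  | zero => intro n; rfl
  | succ m ih => intro n; simp [pvLE, ih]

theorem pvGetD_set_self (t : List Int) : ∀ (k : Nat) (x : Int), k < t.length →
    (t.set k x).getD k 0 = x := by
  induction t with
  | nil => intro k x h; simp at h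
  | cons d t ih =>
    intro k x h
    cases k with
    | zero => rfl
    | succ k => simpa using ih k x (by simpa using h)

theorem pvGetD_set_ne (t : List Int) : ∀ (k m : Nat) (x : Int), k ≠ m →
    (t.set k x).getD m 0 = t.getD m 0 := by
  induction t with
  | nil => intro k m x h; simp
  | cons d t ih =>
    intro k m x h
    cases k with
    | zero => cases m with
      | zero => exact absurd rfl h
      | succ m => rfl
    | succ k => cases m with
      | zero => rfl
      | succ m => simpa using ih k m x (by omega)

theorem pvGetD_oor (t : List Int) : ∀ k : Nat, t.length ≤ k → t.getD k 0 = 0 := by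
  induction t with
  | nil => intro k _; simp
  | cons d t ih =>
    intro k h
    cases k with
    | zero => simp at h
    | succ k => simpa using ih k (by simpa using h)

theorem pvGetD_replicate (n : Nat) : ∀ k : Nat, (List.replicate n (0 : Int)).getD k 0 = 0 := by
  induction n with
  | zero => intro k; simp
  | succ n ih =>
    intro k
    cases k with
    | zero => rfl
    | succ k => simpa [List.replicate] using ih k

theorem pvVal_cons (d : Int) (t : List Int) : pvVal (d :: t) = d + 256 * pvVal t := rfl

theorem pvVal_set (t : List Int) : ∀ (k : Nat) (x : Int), k < t.length →
    pvVal (t.set k x) = pvVal t + (x - t.getD k 0) * 256 ^ k := by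
  induction t with
  | nil => intro k x h; simp at h
  | cons d t ih =>
    intro k x h
    cases k with
    | zero => simp [pvVal_cons]; ring
    | succ k =>
      have := ih k x (by simpa using h)
      simp only [List.set, pvVal_cons, List.getD_cons_succ, this, pow_succ]
      ring

theorem pvVal_replicate (n : Nat) : pvVal (List.replicate n (0 : Int)) = 0 := by
  induction n with
  | zero => rfl
  | succ n ih => simp [List.replicate, pvVal_cons, ih]

theorem pvVal_concat (xs : List Int) (y : Int) :
    pvVal (xs ++ [y]) = pvVal xs + y * 256 ^ xs.length := by
  induction xs with
  | nil => simp [pvVal]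
  | cons d t ih => simp [pvVal_cons, ih, pow_succ]; ring

theorem pvVal_take_succ (t : List Int) (m : Nat) :
    pvVal (t.take (m + 1)) = pvVal (t.take m) + t.getD m 0 * 256 ^ m := by
  by_cases h : m < t.length
  · have h1 : t.take (m + 1) = t.take m ++ [t.getD m 0] := by
      rw [List.take_add_one]
      congr 1
      simp [List.getElem?_eq_getElem h, List.getD_eq_getElem?_getD]
    rw [h1, pvVal_concat, List.length_take]
    simp [Nat.min_eq_left (Nat.le_of_lt h)]
  · have h2 : t.length ≤ m := by omega
    rw [List.take_of_length_le h2, List.take_of_length_le (by omega), pvGetD_oor t m h2]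
    ring

theorem pvBytes_cons_inv {d : Int} {t : List Int} (h : pvBytes (d :: t)) :
    (0 ≤ d ∧ d < 256) ∧ pvBytes t := ⟨h 0, fun k => by simpa using h (k + 1)⟩

theorem pvEqOfVal : ∀ (t u : List Int), pvBytes t → pvBytes u → t.length = u.length →
    pvVal t = pvVal u → t = u := by
  intro t
  induction t with
  | nil => intro u _ _ hl _; cases u with
    | nil => rfl
    | cons e v => simp at hl
  | cons d t ih =>
    intro u ht hu hl hv
    cases u with
    | nil => simp at hl
    | cons e v =>
      obtain ⟨⟨hd0, hd1⟩, ht'⟩ := pvBytes_cons_inv ht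
      obtain ⟨⟨he0, he1⟩, hu'⟩ := pvBytes_cons_inv hu
      rw [pvVal_cons, pvVal_cons] at hv
      have hde : d = e ∧ pvVal t = pvVal v := by constructor <;> omega
      have := ih v ht' hu' (by simpa using hl) hde.2
      rw [hde.1, this]

theorem pvBytes_LE (m : Nat) : ∀ n : Int, pvBytes (pvLE n m) := by
  induction m with
  | zero => intro n k; simp [pvLE]
  | succ m ih =>
    intro n k
    cases k with
    | zero =>
      simp only [pvLE, List.getD_cons_zero]
      constructor
      · exact Int.emod_nonneg n (by norm_num)
      · exact Int.emod_lt_of_pos n (by norm_num)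
    | succ k => simpa [pvLE] using ih (n / 256) k

theorem pvVal_LE (m : Nat) : ∀ n : Int, 0 ≤ n → n < 256 ^ m → pvVal (pvLE n m) = n := by
  induction m with
  | zero => intro n h0 h1; simp at h1 ⊢; simp [pvLE, pvVal]; omega
  | succ m ih =>
    intro n h0 h1
    have hq0 : 0 ≤ n / 256 := Int.ediv_nonneg h0 (by norm_num)
    have hq1 : n / 256 < 256 ^ m := by
      rw [Int.ediv_lt_iff_lt_mul (by norm_num : (0:Int) < 256)]
      calc n < 256 ^ (m + 1) := h1
        _ = 256 ^ m * 256 := by rw [pow_succ]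
    rw [pvLE, pvVal_cons, ih (n / 256) hq0 hq1]
    omega

theorem pvBytes_set {t : List Int} (ht : pvBytes t) (k : Nat) {x : Int}
    (h0 : 0 ≤ x) (h1 : x < 256) : pvBytes (t.set k x) := by
  intro m
  by_cases hm : k = m
  · subst hm
    by_cases hk : k < t.length
    · rw [pvGetD_set_self t k x hk]; exact ⟨h0, h1⟩
    · rw [List.set_eq_of_length_le (by omega)]; exact ht k
  · rw [pvGetD_set_ne t k m x hm]; exact ht m

theorem pvFoldlRangeSucc {α : Type} (f : α → Nat → α) (x : α) (n : Nat) :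
    (List.range (n + 1)).foldl f x = f ((List.range n).foldl f x) n := by
  rw [List.range_succ, List.foldl_append, List.foldl_cons, List.foldl_nil]

-- invariant of A's inner (j) loop after m steps
def pvInnerInv (al bl : List Int) (i : Nat) (t : List Int) (m : Nat) (p : List Int × Int) : Prop :=
  p.1.length = t.length ∧ pvBytes p.1 ∧ (0 ≤ p.2 ∧ p.2 < 256) ∧
  (∀ k, i + m ≤ k → p.1.getD k 0 = t.getD k 0) ∧
  pvVal p.1 + p.2 * 256 ^ (i + m) = pvVal t + bl.getD i 0 * pvVal (al.take m) * 256 ^ i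

theorem pvA_inner (al bl : List Int) (hal : pvBytes al) (hbl : pvBytes bl)
    (i : Nat) (t : List Int) (ht : pvBytes t) :
    ∀ m, i + m ≤ t.length →
      pvInnerInv al bl i t m ((List.range m).foldl (pvAstep al bl i) (t, 0)) := by
  intro m
  induction m with
  | zero =>
    intro _
    exact ⟨rfl, ht, by norm_num, fun k _ => rfl, by simp [pvVal]⟩
  | succ m ih =>
    intro hm
    rw [pvFoldlRangeSucc]
    obtain ⟨hlen, hb, ⟨hc0, hc1⟩, hun, hval⟩ := ih (by omega)
    set p := (List.range m).foldl (pvAstep al bl i) (t, 0) with hp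
    simp only [pvAstep]
    set v := p.1.getD (i + m) 0 + al.getD m 0 * bl.getD i 0 + p.2 with hv
    have him : i + m < p.1.length := by omega
    have hg := hb (i + m)
    have hprod0 : 0 ≤ al.getD m 0 * bl.getD i 0 :=
      mul_nonneg (hal m).1 (hbl i).1
    have hprod1 : al.getD m 0 * bl.getD i 0 ≤ 65025 := by
      have h1 : al.getD m 0 ≤ 255 := by have := (hal m).2; omega
      have h2 : bl.getD i 0 ≤ 255 := by have := (hbl i).2; omega
      calc al.getD m 0 * bl.getD i 0 ≤ 255 * 255 :=
            mul_le_mul h1 h2 (hbl i).1 (by norm_num)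
        _ = 65025 := by norm_num
    have hv0 : 0 ≤ v := by omega
    have hv1 : v < 65536 := by omega
    refine ⟨?_, ?_, ?_, ?_, ?_⟩
    · simp only [List.length_set]; exact hlen
    · exact pvBytes_set hb (i + m) (by omega) (by omega)
    · constructor <;> omega
    · intro k hk
      rw [pvGetD_set_ne p.1 (i + m) k _ (by omega)]
      exact hun k (by omega)
    · rw [pvVal_set p.1 (i + m) _ him, pvVal_take_succ]
      have hve : v % 256 + 256 * (v / 256) = v := by omega
      have e1 : (256 : Int) ^ (i + (m + 1)) = 256 ^ i * 256 ^ m * 256 := by ring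
      have e2 : (256 : Int) ^ (i + m) = 256 ^ i * 256 ^ m := by ring
      rw [e1, e2] at *
      linear_combination hval + (256 : Int) ^ i * 256 ^ m * hve +
        (256 : Int) ^ i * 256 ^ m * hv

theorem pvA_row (al bl : List Int) (hal : pvBytes al) (hbl : pvBytes bl)
    (sn i : Nat) (hi : i < sn) (t : List Int) (ht : pvBytes t)
    (hlen : t.length = 2 * sn) (hz : ∀ k, i + sn ≤ k → t.getD k 0 = 0) :
    (pvArow al bl sn t i).length = 2 * sn ∧ pvBytes (pvArow al bl sn t i) ∧
    (∀ k, (i + 1) + sn ≤ k → (pvArow al bl sn t i).getD k 0 = 0) ∧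
    pvVal (pvArow al bl sn t i) = pvVal t + bl.getD i 0 * pvVal (al.take sn) * 256 ^ i := by
  obtain ⟨plen, pb, ⟨pc0, pc1⟩, pun, pval⟩ :=
    pvA_inner al bl hal hbl i t ht sn (by omega)
  simp only [pvArow]
  set p := (List.range sn).foldl (pvAstep al bl i) (t, 0) with hp
  have hin : i + sn < p.1.length := by omega
  have hzero : p.1.getD (i + sn) 0 = 0 := by
    rw [pun (i + sn) (by omega)]; exact hz (i + sn) (by omega)
  refine ⟨?_, ?_, ?_, ?_⟩
  · simp only [List.length_set]; omega
  · exact pvBytes_set pb (i + sn) (by omega) (by omega)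
  · intro k hk
    rw [pvGetD_set_ne p.1 (i + sn) k _ (by omega), pun k (by omega)]
    exact hz k (by omega)
  · rw [pvVal_set p.1 (i + sn) _ hin, hzero]
    linear_combination pval

theorem pvA_outer (al bl : List Int) (hal : pvBytes al) (hbl : pvBytes bl) (sn : Nat) :
    ∀ m, m ≤ sn →
      (((List.range m).foldl (pvArow al bl sn) (List.replicate (2 * sn) (0 : Int))).length = 2 * sn) ∧
      pvBytes ((List.range m).foldl (pvArow al bl sn) (List.replicate (2 * sn) (0 : Int))) ∧
      (∀ k, m + sn ≤ k →
        ((List.range m).foldl (pvArow al bl sn) (List.replicate (2 * sn) (0 : Int))).getD k 0 = 0) ∧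
      pvVal ((List.range m).foldl (pvArow al bl sn) (List.replicate (2 * sn) (0 : Int))) =
        pvVal (al.take sn) * pvVal (bl.take m) := by
  intro m
  induction m with
  | zero =>
    intro _
    simp only [List.range_zero, List.foldl_nil]
    refine ⟨by simp, fun k => by rw [pvGetD_replicate]; norm_num,
      fun k _ => pvGetD_replicate _ k, by rw [pvVal_replicate]; simp [pvVal]⟩
  | succ m ih =>
    intro hm
    rw [pvFoldlRangeSucc]
    obtain ⟨hlen, hb, hz, hval⟩ := ih (by omega)
    set T := (List.range m).foldl (pvArow al bl sn) (List.replicate (2 * sn) (0 : Int)) with hT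
    obtain ⟨rlen, rb, rz, rval⟩ := pvA_row al bl hal hbl sn m (by omega) T hb hlen hz
    refine ⟨rlen, rb, rz, ?_⟩
    rw [rval, hval, pvVal_take_succ]
    ring

theorem pvTake_self (t : List Int) : t.take t.length = t := List.take_length

-- main equivalence: A's fold equals the little-endian expansion of a*b in 2*sn bytes
theorem pvMain (a b : Int) (sn : Nat) (ha0 : 0 ≤ a) (ha1 : a < 256 ^ sn)
    (hb0 : 0 ≤ b) (hb1 : b < 256 ^ sn) :
    (List.range sn).foldl (pvArow (pvLE a sn) (pvLE b sn) sn) (List.replicate (2 * sn) (0 : Int)) =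
    pvLE (a * b) (2 * sn) := by
  set al := pvLE a sn with hal'
  set bl := pvLE b sn with hbl'
  have hal : pvBytes al := pvBytes_LE sn a
  have hbl : pvBytes bl := pvBytes_LE sn b
  have hlal : al.length = sn := by rw [hal']; exact pvLE_length sn a
  have hlbl : bl.length = sn := by rw [hbl']; exact pvLE_length sn b
  have htka : al.take sn = al := by rw [← hlal]; exact pvTake_self al
  have htkb : bl.take sn = bl := by rw [← hlbl]; exact pvTake_self bl
  have hva : pvVal al = a := pvVal_LE sn a ha0 ha1
  have hvb : pvVal bl = b := pvVal_LE sn b hb0 hb1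
  -- A side
  obtain ⟨Alen, Ab, _, Aval⟩ := pvA_outer al bl hal hbl sn sn (le_refl sn)
  rw [htka, htkb, hva, hvb] at Aval
  -- the product fits: a*b < 256^(2*sn)
  have hab : a * b < 256 ^ (2 * sn) := by
    have h2 : (256 : Int) ^ (2 * sn) = 256 ^ sn * 256 ^ sn := by
      rw [two_mul, pow_add]
    rw [h2]
    rcases eq_or_lt_of_le ha0 with h | h
    · have hp : (0:Int) < 256 ^ sn := by positivity
      nlinarith
    · nlinarith
  have hab0 : 0 ≤ a * b := mul_nonneg ha0 hb0
  exact pvEqOfVal _ _ Ab (pvBytes_LE (2 * sn) (a * b))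
    (by rw [Alen, pvLE_length]) (by rw [Aval, pvVal_LE (2 * sn) (a * b) hab0 hab])

-- ===== VERDICT (by name: the statement is the Claim_ definition above) =====
theorem bytes_mul_spec : Claim_equal_bytes_mul := by
  intro a b s hdom hpre
  unfold Pre_bytes_mul at hpre
  simp only [Bool.and_eq_true, Bool.or_eq_true, decide_eq_true_eq] at hpre
  obtain ⟨⟨⟨hs, ha0⟩, hb0⟩, hbound⟩ := hpre
  have hdoma : -2147483648 ≤ a ∧ a ≤ 2147483648 := by
    have := hdom
    unfold Dom_bytes_mul pvDomInt at this
    simp only [Bool.and_eq_true, decide_eq_true_eq] at this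
    exact this.1.1
  have hdomb : -2147483648 ≤ b ∧ b ≤ 2147483648 := by
    have := hdom
    unfold Dom_bytes_mul pvDomInt at this
    simp only [Bool.and_eq_true, decide_eq_true_eq] at this
    exact this.1.2
  set sn := s.toNat with hsn
  have hbnd : a < 256 ^ sn ∧ b < 256 ^ sn := by
    rcases hbound with h4 | ⟨hA, hB⟩
    · have h4n : 4 ≤ sn := by omega
      have : (256 : Int) ^ 4 ≤ 256 ^ sn := pow_le_pow_right₀ (by norm_num) h4n
      constructor <;> nlinarith [hdoma.2, hdomb.2]
    · constructor
      · have h1 : (a.toNat : Int) < ((256 ^ sn : Nat) : Int) := Int.ofNat_lt.mpr hA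
        rw [Int.toNat_of_nonneg ha0] at h1
        push_cast at h1
        exact h1
      · have h1 : (b.toNat : Int) < ((256 ^ sn : Nat) : Int) := Int.ofNat_lt.mpr hB
        rw [Int.toNat_of_nonneg hb0] at h1
        push_cast at h1
        exact h1
  unfold Spec_bytes_mul bytes_mul bytes_mul_alt
  simp only [pvLE_rev]
  rw [pvMain a b sn ha0 hbnd.1 hb0 hbnd.2, ← pvLE_rev, List.reverse_reverse]
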